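-- pv_equiv track=rewrite | github.com/afcarl/graph-services | services/ig_layout/service/test/service_test.py | countEdge
-- ===== SOURCE A (Python) =====
-- def countEdge(cx):
--     edge_list = {}
--     for aspect in cx:
--         for key, values in aspect.items():
--             if "edges" == key:
--                 for edge in values:
--                     edge_list[edge['@id']] = edge
--     return edge_list, len(edge_list)
-- ===== SOURCE B (Python) =====
-- def countEdge(cx):
--     # Recursive divide-and-merge: the edges dict of the first aspect,
--     # merged (dict.update) with the recursively built dict of the rest.
--     if not cx:
--         return {}, 0
--     edge_list = {e['@id']: e for e in cx[0].get('edges', [])}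
--     rest, _ = countEdge(cx[1:])
--     edge_list.update(rest)
--     return edge_list, len(edge_list)
-- ===== Notes on version B (the rewrite author's own statement) =====
-- stated objective: alternative
-- what changed: Replaces A's iterative triple-nested items()-scan (testing every key against 'edges' while mutating one shared dict) by a recursive divide-and-merge: the head aspect's edges dict, built by direct .get lookup, is dict.update-merged with the recursively computed dict of the remaining aspects; Pre_ excludes inputs whose edges lack an '@id' key (A raises KeyError there) and association lists with duplicate keys, which no Python dict input can represent.
import Mathlib
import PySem

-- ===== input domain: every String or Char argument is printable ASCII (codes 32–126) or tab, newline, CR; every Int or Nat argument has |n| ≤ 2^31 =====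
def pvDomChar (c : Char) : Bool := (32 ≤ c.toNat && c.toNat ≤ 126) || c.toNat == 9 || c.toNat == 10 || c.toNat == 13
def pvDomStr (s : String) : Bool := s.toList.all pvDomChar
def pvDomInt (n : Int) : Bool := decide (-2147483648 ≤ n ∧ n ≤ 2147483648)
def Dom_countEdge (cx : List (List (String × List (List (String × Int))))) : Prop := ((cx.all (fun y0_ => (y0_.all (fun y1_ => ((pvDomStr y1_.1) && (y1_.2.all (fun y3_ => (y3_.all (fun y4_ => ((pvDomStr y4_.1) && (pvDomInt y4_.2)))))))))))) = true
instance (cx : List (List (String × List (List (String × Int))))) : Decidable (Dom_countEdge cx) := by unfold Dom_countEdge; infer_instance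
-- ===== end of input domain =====

-- B replaces A's iterative triple-nested items()-scan (mutating one shared dict) by a
-- recursive divide-and-merge: head aspect's edges dict (direct .get lookup), merged via
-- dict.update with the recursively built dict of the rest; alternative decomposition, same cost class.

-- shared helper: the Python expression edge['@id'] used as a dict key (identical in A and B)
def pvIdOf (edge : List (String × Int)) : Int :=
  ((PySem.Dict.mk edge).get? "@id").getD 0

-- shared helper: the Python statement  edge_list[edge['@id']] = edge  (identical in A and B)
def pvInsertEdge (el : PySem.Dict Int (List (String × Int))) (edge : List (String × Int)) :
    PySem.Dict Int (List (String × Int)) :=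
  el.insert (pvIdOf edge) edge

-- ===== PORT A =====
def countEdge (cx : List (List (String × List (List (String × Int))))) : (List (Int × List (String × Int))) × Int :=
  let el := cx.foldl (fun el aspect =>
    aspect.foldl (fun el kv =>
      if "edges" == kv.1 then kv.2.foldl pvInsertEdge el else el) el)
    PySem.Dict.empty
  (el.items, (el.size : Int))

-- ===== PORT B =====
def countEdge_alt (cx : List (List (String × List (List (String × Int))))) : (List (Int × List (String × Int))) × Int :=
  match cx with
  | [] => ([], 0)
  | a :: rest =>
    -- edge_list = {e['@id']: e for e in cx[0].get('edges', [])}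
    let edgeList := ((PySem.Dict.mk a).getD "edges" []).foldl pvInsertEdge PySem.Dict.empty
    -- rest, _ = countEdge(cx[1:])
    let restPair := countEdge_alt rest
    -- edge_list.update(rest)
    let merged := edgeList.update restPair.1
    (merged.items, (merged.size : Int))

-- ===== PRECONDITION & SPEC =====
-- Pre_ excludes: (a) aspects or edges whose association lists carry duplicate keys — such
-- inputs correspond to no Python dict and their behaviour is a representation artefact;
-- (b) an edge under an "edges" key lacking "@id", where Python A raises KeyError.
def Pre_countEdge (cx : List (List (String × List (List (String × Int))))) : Prop :=
  ∀ aspect ∈ cx, (aspect.map Prod.fst).Nodup ∧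
    ∀ kv ∈ aspect, kv.1 = "edges" →
      ∀ edge ∈ kv.2, "@id" ∈ edge.map Prod.fst ∧ (edge.map Prod.fst).Nodup
instance (cx : List (List (String × List (List (String × Int))))) : Decidable (Pre_countEdge cx) := by unfold Pre_countEdge; infer_instance

def pvWitness_countEdge : (List (List (String × List (List (String × Int))))) :=
  [[("nodes", [[("@id", 1)]]), ("edges", [[("@id", 5), ("s", 1)], [("@id", 6)]])], [("edges", [[("@id", 7)]])], []]

def Spec_countEdge (cx : List (List (String × List (List (String × Int))))) (out : (List (Int × List (String × Int))) × Int) : Prop := out = countEdge_alt cx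
instance (cx : List (List (String × List (List (String × Int))))) (out : (List (Int × List (String × Int))) × Int) : Decidable (Spec_countEdge cx out) := by unfold Spec_countEdge; infer_instance

-- ===== CLAIM (what is proved, stated in full; the proofs are below) =====
def Claim_equal_countEdge : Prop := ∀ (cx : List (List (String × List (List (String × Int))))), Dom_countEdge cx → Pre_countEdge cx → Spec_countEdge cx (countEdge cx)

-- ===== LEMMAS AND PROOFS =====

-- abbreviation used only by the proofs: the list aspect.get('edges', [])
def pvEdgesOf (aspect : List (String × List (List (String × Int)))) : List (List (String × Int)) :=
  (PySem.Dict.mk aspect).getD "edges" []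

-- the last edge of l whose '@id' is k (overwrite semantics: the surviving value)
def pvLastE (l : List (List (String × Int))) (k : Int) : Option (List (String × Int)) :=
  l.reverse.find? (fun e => pvIdOf e == k)

-- a scan over items none of whose keys is "edges" leaves the accumulator unchanged
lemma scan_no_edges {α : Type} (g : α → List (List (String × Int)) → α) :
    ∀ (l : List (String × List (List (String × Int)))) (el : α),
      "edges" ∉ l.map Prod.fst →
      l.foldl (fun el kv => if "edges" == kv.1 then g el kv.2 else el) el = el := by
  intro l
  induction l with
  | nil => intro el _; rfl
  | cons kv rest ih =>
    intro el h
    simp only [List.map_cons, List.mem_cons] at h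
    push Not at h
    simp only [List.foldl_cons]
    rw [if_neg (by simpa using h.1), ih el h.2]

-- the items()-scan with the "edges" test equals a direct getD lookup, for Nodup keys
lemma scan_eq_getD {α : Type} (g : α → List (List (String × Int)) → α)
    (hnil : ∀ el, g el [] = el) :
    ∀ (l : List (String × List (List (String × Int)))) (el : α),
      (l.map Prod.fst).Nodup →
      l.foldl (fun el kv => if "edges" == kv.1 then g el kv.2 else el) el
        = g el ((PySem.Dict.mk l).getD "edges" []) := by
  intro l
  induction l with
  | nil =>
    intro el _
    simp [PySem.Dict.getD, PySem.Dict.get?, hnil]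
  | cons kv rest ih =>
    intro el hnd
    obtain ⟨k, v⟩ := kv
    simp only [List.map_cons, List.nodup_cons] at hnd
    by_cases hk : k = "edges"
    · subst hk
      simp only [List.foldl_cons, beq_self_eq_true, if_true]
      rw [scan_no_edges g rest _ hnd.1]
      rw [PySem.Dict.getD_eq_get?_getD, PySem.Dict.get?_mk_cons]
      simp
    · have hb : (("edges" : String) == k) = false := by simp [Ne.symm hk]
      have hb2 : ((k : String) == "edges") = false := by simp [hk]
      simp only [List.foldl_cons, hb]
      simp only [if_neg (by simp : ¬(false = true))]
      rw [ih el hnd.2]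
      conv_rhs => rw [PySem.Dict.getD_eq_get?_getD, PySem.Dict.get?_mk_cons, hb2]
      simp [PySem.Dict.getD_eq_get?_getD]

-- A's fold, with the scan replaced by the direct lookup (uses Pre_'s Nodup aspect keys)
lemma countEdge_eq_lookup_fold (cx : List (List (String × List (List (String × Int)))))
    (h : ∀ a ∈ cx, (a.map Prod.fst).Nodup) :
    cx.foldl (fun el aspect =>
      aspect.foldl (fun el kv =>
        if "edges" == kv.1 then kv.2.foldl pvInsertEdge el else el) el) PySem.Dict.empty
      = cx.foldl (fun el aspect => (pvEdgesOf aspect).foldl pvInsertEdge el) PySem.Dict.empty := by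
  have main : ∀ (l : List (List (String × List (List (String × Int)))))
      (el : PySem.Dict Int (List (String × Int))),
      (∀ a ∈ l, (a.map Prod.fst).Nodup) →
      l.foldl (fun el aspect =>
        aspect.foldl (fun el kv =>
          if "edges" == kv.1 then kv.2.foldl pvInsertEdge el else el) el) el
        = l.foldl (fun el aspect => (pvEdgesOf aspect).foldl pvInsertEdge el) el := by
    intro l
    induction l with
    | nil => intro el _; rfl
    | cons a rest ih =>
      intro el hl
      simp only [List.foldl_cons]
      rw [scan_eq_getD (fun el v => v.foldl pvInsertEdge el) (fun _ => rfl) a el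
            (hl a (List.mem_cons_self ..)),
          ih _ (fun x hx => hl x (List.mem_cons_of_mem _ hx))]
      rfl
  exact main cx PySem.Dict.empty h

-- lookup after a generic insert loop: the LAST matching element wins, else the start dict
lemma get?_foldl_insert {κ ν β : Type} [BEq κ] [LawfulBEq κ] [DecidableEq κ] (key : β → κ) (val : β → ν) :
    ∀ (l : List β) (d : PySem.Dict κ ν) (k : κ),
      (l.foldl (fun d x => d.insert (key x) (val x)) d).get? k
        = ((l.reverse.find? (fun x => key x == k)).map val).or (d.get? k) := by
  intro l
  induction l with
  | nil => intro d k; simp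
  | cons e t ih =>
    intro d k
    simp only [List.foldl_cons, List.reverse_cons, List.find?_append]
    rw [ih, Option.map_or, Option.or_assoc]
    congr 1
    rw [PySem.Dict.get?_insert]
    by_cases hk : k = key e
    · subst hk; simp [List.find?]
    · have : (key e == k) = false := by simpa using Ne.symm hk
      simp [this, hk, List.find?]

-- lookup in A's accumulated dict: last edge with id k over the flattened edges
lemma get?_A_fold :
    ∀ (cx : List (List (String × List (List (String × Int)))))
      (d : PySem.Dict Int (List (String × Int))) (k : Int),
      (cx.foldl (fun el aspect => (pvEdgesOf aspect).foldl pvInsertEdge el) d).get? k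
        = (pvLastE (cx.flatMap pvEdgesOf) k).or (d.get? k) := by
  intro cx
  induction cx with
  | nil => intro d k; simp [pvLastE]
  | cons a rest ih =>
    intro d k
    simp only [List.foldl_cons, List.flatMap_cons]
    rw [ih]
    have hF : ((pvEdgesOf a).foldl pvInsertEdge d).get? k
        = (((pvEdgesOf a).reverse.find? (fun e => pvIdOf e == k)).map id).or (d.get? k) :=
      get?_foldl_insert pvIdOf id (pvEdgesOf a) d k
    rw [hF]
    simp only [pvLastE, List.reverse_append, List.find?_append, Option.map_id]
    rw [Option.or_assoc]
    simp only [id_eq]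

-- keys of A's accumulated dict: the ids of the flattened edges, first occurrences in order
lemma keys_A_fold :
    ∀ (cx : List (List (String × List (List (String × Int)))))
      (d : PySem.Dict Int (List (String × Int))),
      (cx.foldl (fun el aspect => (pvEdgesOf aspect).foldl pvInsertEdge el) d).keys
        = PySem.Set.update d.keys ((cx.flatMap pvEdgesOf).map pvIdOf) := by
  intro cx
  induction cx with
  | nil => intro d; simp
  | cons a rest ih =>
    intro d
    simp only [List.foldl_cons, List.flatMap_cons, List.map_append]
    rw [ih]
    have : (pvEdgesOf a).foldl pvInsertEdge d
        = (pvEdgesOf a).foldl (fun d e => d.insert (pvIdOf e) e) d := rfl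
    rw [this, PySem.Dict.keys_foldl_insert_key (pvEdgesOf a) pvIdOf (fun _ e => e) d,
        PySem.Set.update_append]

lemma nodup_keys_A_fold (cx : List (List (String × List (List (String × Int))))) :
    (cx.foldl (fun el aspect => (pvEdgesOf aspect).foldl pvInsertEdge el)
      (PySem.Dict.empty : PySem.Dict Int (List (String × Int)))).keys.Nodup := by
  rw [keys_A_fold]
  exact PySem.Set.nodup_update _ _ (by simp [PySem.Dict.keys_empty])

-- the dict B's recursion carries (countEdge_alt returns its items and size)
def pvGoB (cx : List (List (String × List (List (String × Int))))) :
    PySem.Dict Int (List (String × Int)) :=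
  match cx with
  | [] => PySem.Dict.empty
  | a :: rest => ((pvEdgesOf a).foldl pvInsertEdge PySem.Dict.empty).update (pvGoB rest).items

lemma countEdge_alt_eq_goB (cx : List (List (String × List (List (String × Int))))) :
    countEdge_alt cx = ((pvGoB cx).items, ((pvGoB cx).size : Int)) := by
  induction cx with
  | nil => rfl
  | cons a rest ih =>
    simp only [countEdge_alt, pvGoB, ih]
    rfl

-- update s (set(ys)) = update s ys  (first occurrences only, in the same order)
lemma set_update_ofList {α : Type} [BEq α] [LawfulBEq α] (s : PySem.Set α) (ys : List α) :
    PySem.Set.update s (PySem.Set.ofList ys) = PySem.Set.update s ys := by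
  rw [PySem.Set.update_eq_append_filter, PySem.Set.update_eq_append_filter,
      PySem.Set.ofList_ofList]

lemma nodup_keys_goB (cx : List (List (String × List (List (String × Int))))) :
    (pvGoB cx).keys.Nodup := by
  cases cx with
  | nil => simp [pvGoB, PySem.Dict.keys_empty]
  | cons a rest =>
    show (((pvEdgesOf a).foldl pvInsertEdge PySem.Dict.empty).update (pvGoB rest).items).keys.Nodup
    have h0 : ((pvEdgesOf a).foldl (fun d e => d.insert (pvIdOf e) e)
        (PySem.Dict.empty : PySem.Dict Int (List (String × Int)))).keys.Nodup :=
      PySem.Dict.nodup_keys_foldl_insert_key _ pvIdOf (fun _ e => e) _ (by simp [PySem.Dict.keys_empty])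
    exact PySem.Dict.nodup_keys_foldl_insert_key _ Prod.fst (fun _ p => p.2) _ h0

-- with Nodup keys, searching items from the back finds the same (unique) pair as from the front
lemma find?_reverse_of_nodup {κ ν : Type} [BEq κ] [LawfulBEq κ] :
    ∀ (ps : List (κ × ν)) (k : κ), (ps.map Prod.fst).Nodup →
      ps.reverse.find? (fun p => p.1 == k) = ps.find? (fun p => p.1 == k) := by
  intro ps
  induction ps with
  | nil => intro k _; rfl
  | cons q t ih =>
    intro k hnd
    simp only [List.map_cons, List.nodup_cons] at hnd
    simp only [List.reverse_cons, List.find?_append, List.find?_cons]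
    rw [ih k hnd.2]
    by_cases hq : q.1 = k
    · have hnone : t.find? (fun p => p.1 == k) = none := by
        rw [List.find?_eq_none]
        intro p hp
        simp only [beq_iff_eq]
        intro hpk
        refine hnd.1 ?_
        rw [hq, ← hpk]
        exact List.mem_map_of_mem hp
      simp [hq, hnone]
    · have : (q.1 == k) = false := by simpa using hq
      simp [this]

-- lookup in B's dict: the same "last edge with id k" characterisation as A's
lemma get?_goB (cx : List (List (String × List (List (String × Int))))) (k : Int) :
    (pvGoB cx).get? k = pvLastE (cx.flatMap pvEdgesOf) k := by
  induction cx with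
  | nil => simp [pvGoB, pvLastE]
  | cons a rest ih =>
    show (((pvEdgesOf a).foldl pvInsertEdge PySem.Dict.empty).update (pvGoB rest).items).get? k = _
    have hupd : (((pvEdgesOf a).foldl pvInsertEdge PySem.Dict.empty).update (pvGoB rest).items).get? k
        = (((pvGoB rest).items.reverse.find? (fun p => p.1 == k)).map Prod.snd).or
            (((pvEdgesOf a).foldl pvInsertEdge PySem.Dict.empty).get? k) :=
      get?_foldl_insert Prod.fst Prod.snd (pvGoB rest).items _ k
    rw [hupd, find?_reverse_of_nodup _ k (nodup_keys_goB rest)]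
    have hrest : ((pvGoB rest).items.find? (fun p => p.1 == k)).map Prod.snd = (pvGoB rest).get? k := rfl
    rw [hrest, ih]
    have hhead : ((pvEdgesOf a).foldl pvInsertEdge (PySem.Dict.empty : PySem.Dict Int (List (String × Int)))).get? k
        = ((pvEdgesOf a).reverse.find? (fun e => pvIdOf e == k)).map id := by
      have := get?_foldl_insert pvIdOf id (pvEdgesOf a)
        (PySem.Dict.empty : PySem.Dict Int (List (String × Int))) k
      simpa using this
    rw [hhead]
    simp only [pvLastE, List.flatMap_cons, List.reverse_append, List.find?_append, Option.map_id]
    cases h : (rest.flatMap pvEdgesOf).reverse.find? (fun e => pvIdOf e == k) <;> simp [Option.or]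

-- keys of B's dict: the same first-occurrence id list as A's
lemma keys_goB (cx : List (List (String × List (List (String × Int))))) :
    (pvGoB cx).keys = PySem.Set.ofList ((cx.flatMap pvEdgesOf).map pvIdOf) := by
  induction cx with
  | nil => simp [pvGoB, PySem.Dict.keys_empty]
  | cons a rest ih =>
    show (((pvEdgesOf a).foldl pvInsertEdge PySem.Dict.empty).update (pvGoB rest).items).keys = _
    have hupd : (((pvEdgesOf a).foldl pvInsertEdge PySem.Dict.empty).update (pvGoB rest).items).keys
        = PySem.Set.update ((pvEdgesOf a).foldl pvInsertEdge
            (PySem.Dict.empty : PySem.Dict Int (List (String × Int)))).keys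
            ((pvGoB rest).items.map Prod.fst) :=
      PySem.Dict.keys_foldl_insert_key (pvGoB rest).items Prod.fst (fun _ p => p.2) _
    rw [hupd]
    have hitems : (pvGoB rest).items.map Prod.fst = (pvGoB rest).keys := rfl
    have hhead : ((pvEdgesOf a).foldl pvInsertEdge
        (PySem.Dict.empty : PySem.Dict Int (List (String × Int)))).keys
        = PySem.Set.ofList ((pvEdgesOf a).map pvIdOf) := by
      rw [show (pvEdgesOf a).foldl pvInsertEdge (PySem.Dict.empty : PySem.Dict Int (List (String × Int)))
            = (pvEdgesOf a).foldl (fun d e => d.insert (pvIdOf e) e) PySem.Dict.empty from rfl,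
          PySem.Dict.keys_foldl_insert_key (pvEdgesOf a) pvIdOf (fun _ e => e) _]
      simp [PySem.Dict.keys_empty, PySem.Set.update_nil_left]
    rw [hitems, hhead, ih, set_update_ofList, ← PySem.Set.ofList_append,
        List.flatMap_cons, List.map_append]

-- ===== VERDICT (by name: the statement is the Claim_ definition above) =====
theorem countEdge_spec : Claim_equal_countEdge := by
  intro cx _ hpre
  unfold Spec_countEdge countEdge
  have hd := countEdge_eq_lookup_fold cx (fun a ha => (hpre a ha).1)
  have hd2 : cx.foldl (fun el aspect => (pvEdgesOf aspect).foldl pvInsertEdge el)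
      PySem.Dict.empty = pvGoB cx := by
    apply PySem.Dict.ext
    rw [PySem.Dict.items_eq_map_keys _ (nodup_keys_A_fold cx) [],
        PySem.Dict.items_eq_map_keys (pvGoB cx) (nodup_keys_goB cx) []]
    have hkeys : (cx.foldl (fun el aspect => (pvEdgesOf aspect).foldl pvInsertEdge el)
        (PySem.Dict.empty : PySem.Dict Int (List (String × Int)))).keys = (pvGoB cx).keys := by
      rw [keys_A_fold, keys_goB]
      simp [PySem.Dict.keys_empty, PySem.Set.update_nil_left]
    rw [hkeys]
    apply List.map_congr_left
    intro k _
    rw [PySem.Dict.getD_eq_get?_getD, PySem.Dict.getD_eq_get?_getD, get?_A_fold, get?_goB]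
    simp
  rw [hd, hd2, countEdge_alt_eq_goB]
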